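-- pv_equiv track=rewrite | github.com/fowill/EconSearch | ingest.py | _extract_abstract_from_lines
-- ===== SOURCE A (Python) =====
-- from typing import Dict, List, Optional, Sequence, Tuple
--
-- def _uppercase_ratio(text: str) -> float:
--     letters = [ch for ch in text if ch.isalpha()]
--     if not letters:
--         return 0.0
--     return sum(1 for ch in letters if ch.isupper()) / len(letters)
--
-- SECTION_STOPWORDS = {
--     "introduction",
--     "background",
--     "methods",
--     "data",
--     "results",
--     "conclusion",
--     "conclusions",
--     "discussion",
--     "literature review",
--     "related literature",
--     "model",
--     "theory",
-- }
--
-- def _is_section_heading(line: str) -> bool: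
--     normalized = line.lower().strip(" :")
--     if normalized in SECTION_STOPWORDS:
--         return True
--     uppercase_ratio = _uppercase_ratio(line)
--     if uppercase_ratio > 0.85 and len(line.split()) <= 12:
--         return True
--     return False
--
-- def _extract_abstract_from_lines(lines: List[str], abstract_idx: Optional[int]) -> Optional[str]:
--     if abstract_idx is None:
--         return None
--     abstract_lines: List[str] = []
--     for line in lines[abstract_idx + 1 :]:
--         if not line:
--             if abstract_lines:
--                 break
--             continue
--         if _is_section_heading(line):
--             break
--         abstract_lines.append(line)
--         if len(" ".join(abstract_lines)) >= 1500:
--             break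
--     if not abstract_lines:
--         return None
--     return " ".join(abstract_lines)[:1500]
-- ===== SOURCE B (Python) =====
-- from typing import List, Optional
--
-- SECTION_STOPWORDS = {
--     "introduction",
--     "background",
--     "methods",
--     "data",
--     "results",
--     "conclusion",
--     "conclusions",
--     "discussion",
--     "literature review",
--     "related literature",
--     "model",
--     "theory",
-- }
--
--
-- def _uppercase_ratio(text: str) -> float:
--     letters = [ch for ch in text if ch.isalpha()]
--     if not letters:
--         return 0.0
--     return sum(1 for ch in letters if ch.isupper()) / len(letters)
--
--
-- def _is_section_heading(line: str) -> bool: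
--     normalized = line.lower().strip(" :")
--     if normalized in SECTION_STOPWORDS:
--         return True
--     uppercase_ratio = _uppercase_ratio(line)
--     if uppercase_ratio > 0.85 and len(line.split()) <= 12:
--         return True
--     return False
--
--
-- def _extract_abstract_from_lines(lines: List[str], abstract_idx: Optional[int]) -> Optional[str]:
--     # Index/slice formulation: no accumulator loop.  The abstract is the first
--     # maximal block of non-blank lines after the heading, cut at the first
--     # section heading inside it, joined and truncated once to 1500 chars.
--     if abstract_idx is None:
--         return None
--     rest = lines[abstract_idx + 1:]
--     start = next((i for i, l in enumerate(rest) if l), None)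
--     if start is None:
--         return None
--     stop = next((i for i in range(start, len(rest)) if not rest[i]), len(rest))
--     para = rest[start:stop]
--     cut = next((j for j, l in enumerate(para) if _is_section_heading(l)), len(para))
--     para = para[:cut]
--     if not para:
--         return None
--     return " ".join(para)[:1500]
-- ===== Notes on version B (the rewrite author's own statement) =====
-- stated objective: alternative
-- what changed: A's single stateful accumulator loop (blank handling conditioned on the accumulator, break on headings, and a re-join of the whole accumulator each iteration against a 1500-char cap) is replaced by an index/slice formulation with no accumulator at all: three first-index searches (first non-blank line, next blank line, first section heading) delimit the abstract block, which is extracted by list slicing and joined/truncated exactly once; the in-loop cap is redundant because the final [:1500] discards everything past 1500 chars.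
import Mathlib
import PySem

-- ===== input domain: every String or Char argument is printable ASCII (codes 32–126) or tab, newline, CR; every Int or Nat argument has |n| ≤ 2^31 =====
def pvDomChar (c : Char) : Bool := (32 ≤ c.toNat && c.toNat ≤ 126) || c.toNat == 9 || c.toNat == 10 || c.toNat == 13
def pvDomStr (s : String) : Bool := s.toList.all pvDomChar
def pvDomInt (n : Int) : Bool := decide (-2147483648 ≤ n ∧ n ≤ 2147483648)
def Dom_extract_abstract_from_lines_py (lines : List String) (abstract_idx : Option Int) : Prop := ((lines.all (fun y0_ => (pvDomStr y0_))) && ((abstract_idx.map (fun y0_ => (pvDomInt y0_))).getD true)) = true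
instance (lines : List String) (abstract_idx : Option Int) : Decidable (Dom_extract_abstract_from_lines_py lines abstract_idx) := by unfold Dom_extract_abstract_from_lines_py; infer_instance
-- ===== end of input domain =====

-- B replaces A's stateful accumulator loop (blank handling conditioned on the accumulator,
-- break on headings, a re-join of the whole accumulator each iteration against a 1500-char cap)
-- by an index/slice formulation: three first-index searches delimit the abstract block, which is
-- sliced out and joined/truncated once; objective: alternative (no accumulator, same cost class).

-- ===== PORT A =====
-- shared helper for `_is_section_heading`'s membership test
def sectionStopwords : List String :=
  ["introduction", "background", "methods", "data", "results", "conclusion",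
   "conclusions", "discussion", "literature review", "related literature", "model", "theory"]

-- `_uppercase_ratio(line) > 0.85` ported as the exact integer comparison 20*u > 17*l:
-- for letter counts u ≤ l of any realistic line length the IEEE-double division and the
-- literal 0.85 round too little to flip this comparison, so it is exact on Dom strings.
def uppercaseRatioGt (line : String) : Bool :=
  let letters := line.toList.filter PySem.Chars.isalpha
  20 * (letters.filter PySem.Chars.isupper).length > 17 * letters.length

-- shared port of `_is_section_heading` (both Pythons use the identical helper)
def isSectionHeading (line : String) : Bool :=
  let normalized := PySem.Str.stripChars (PySem.Str.lower line) " :"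
  if sectionStopwords.contains normalized then true
  else if uppercaseRatioGt line && (PySem.Str.split₀ line).length ≤ 12 then true
  else false

-- A's for-loop with its two breaks, the continue, and the in-loop join/length test
def loopA : List String → List String → List String
  | [], acc => acc
  | line :: rest, acc =>
    if line == "" then
      (if acc.isEmpty then loopA rest acc else acc)
    else if isSectionHeading line then acc
    else
      let acc2 := acc ++ [line]
      if 1500 ≤ PySem.Str.len (PySem.Str.join " " acc2) then acc2
      else loopA rest acc2

def extract_abstract_from_lines_py (lines : List String) (abstract_idx : Option Int) : Option String :=
  match abstract_idx with
  | none => none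
  | some idx =>
    let abstract_lines := loopA (PySem.List.slice lines (some (idx + 1)) none) []
    if abstract_lines.isEmpty then none
    else some (PySem.Str.slice (PySem.Str.join " " abstract_lines) none (some 1500))

-- ===== PORT B =====
-- Source B's `next((i for i, l in enumerate(xs) if p(l)), None)`: first index satisfying p
def findFirst (p : String → Bool) : List String → Option Nat
  | [] => none
  | x :: t => if p x then some 0 else (findFirst p t).map (· + 1)

def extract_abstract_from_lines_py_alt (lines : List String) (abstract_idx : Option Int) : Option String :=
  match abstract_idx with
  | none => none
  | some idx =>
    let rest := PySem.List.slice lines (some (idx + 1)) none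
    -- start = next((i for i, l in enumerate(rest) if l), None); if None: return None
    match findFirst (fun l => !(l == "")) rest with
    | none => none
    | some start =>
      -- stop = next((i for i in range(start, len(rest)) if not rest[i]), len(rest)),
      -- searched from index `start`, hence on rest.drop start with the offset added back
      let stop : Nat := match findFirst (fun l => l == "") (rest.drop start) with
        | some k => start + k
        | none => rest.length
      let para := PySem.List.slice rest (some (start : Int)) (some (stop : Int))
      -- cut = next((j for j, l in enumerate(para) if _is_section_heading(l)), len(para))
      let cut : Nat := match findFirst isSectionHeading para with
        | some j => j
        | none => para.length
      let para2 := PySem.List.slice para none (some (cut : Int))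
      if para2.isEmpty then none
      else some (PySem.Str.slice (PySem.Str.join " " para2) none (some 1500))

-- ===== PRECONDITION & SPEC =====
def Spec_extract_abstract_from_lines_py (lines : List String) (abstract_idx : Option Int) (out : Option String) : Prop := out = extract_abstract_from_lines_py_alt lines abstract_idx
instance (lines : List String) (abstract_idx : Option Int) (out : Option String) : Decidable (Spec_extract_abstract_from_lines_py lines abstract_idx out) := by unfold Spec_extract_abstract_from_lines_py; infer_instance

-- ===== CLAIM (what is proved, stated in full; the proofs are below) =====
def Claim_equal_extract_abstract_from_lines_py : Prop := ∀ (lines : List String) (abstract_idx : Option Int), Dom_extract_abstract_from_lines_py lines abstract_idx → Spec_extract_abstract_from_lines_py lines abstract_idx (extract_abstract_from_lines_py lines abstract_idx)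

-- ===== LEMMAS AND PROOFS =====

-- the collect predicate (line is non-blank and not a heading)
def goodLine (l : String) : Bool := !(l == "" || isSectionHeading l)

-- findFirst vs takeWhile/dropWhile
theorem findFirst_none_takeWhile (p : String → Bool) (l : List String)
    (h : findFirst p l = none) : l.takeWhile (fun x => !p x) = l := by
  induction l with
  | nil => rfl
  | cons x t ih =>
    by_cases hp : p x = true
    · simp [findFirst, hp] at h
    · simp only [findFirst, hp, if_false, Bool.false_eq_true, Option.map_eq_none_iff] at h
      simp [List.takeWhile_cons, hp, ih h]

theorem findFirst_none_dropWhile (p : String → Bool) (l : List String)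
    (h : findFirst p l = none) : l.dropWhile (fun x => !p x) = [] := by
  induction l with
  | nil => rfl
  | cons x t ih =>
    by_cases hp : p x = true
    · simp [findFirst, hp] at h
    · simp only [findFirst, hp, if_false, Bool.false_eq_true, Option.map_eq_none_iff] at h
      simp [List.dropWhile_cons, hp, ih h]

theorem findFirst_some_take (p : String → Bool) (l : List String) (n : Nat)
    (h : findFirst p l = some n) : l.take n = l.takeWhile (fun x => !p x) := by
  induction l generalizing n with
  | nil => simp [findFirst] at h
  | cons x t ih =>
    by_cases hp : p x = true
    · simp [findFirst, hp] at h
      subst h; simp [hp]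
    · cases hft : findFirst p t with
      | none => simp [findFirst, hp, hft] at h
      | some m =>
        simp [findFirst, hp, hft] at h
        subst h
        simp [List.takeWhile_cons, hp, ih m hft]

theorem findFirst_some_drop (p : String → Bool) (l : List String) (n : Nat)
    (h : findFirst p l = some n) : l.drop n = l.dropWhile (fun x => !p x) := by
  induction l generalizing n with
  | nil => simp [findFirst] at h
  | cons x t ih =>
    by_cases hp : p x = true
    · simp [findFirst, hp] at h
      subst h; simp [hp]
    · cases hft : findFirst p t with
      | none => simp [findFirst, hp, hft] at h
      | some m =>
        simp [findFirst, hp, hft] at h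
        subst h
        simp [List.dropWhile_cons, hp, ih m hft]

-- splitting the collect predicate: stop at blank, then stop at heading
theorem takeWhile_good (L : List String) :
    (L.takeWhile (fun x => !(x == ""))).takeWhile (fun x => !isSectionHeading x)
      = L.takeWhile goodLine := by
  induction L with
  | nil => simp
  | cons x t ih =>
    by_cases hb : (x == "") = true
    · simp only [List.takeWhile_cons, hb, goodLine, Bool.true_or, Bool.not_true,
        Bool.false_eq_true, if_false, List.takeWhile_nil]
    · by_cases hh : isSectionHeading x = true
      · simp only [List.takeWhile_cons, hb, hh, goodLine, Bool.or_true, Bool.not_true,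
          Bool.false_eq_true, if_false, Bool.not_false, if_true, List.takeWhile_nil]
      · simp only [List.takeWhile_cons, hb, hh, goodLine, Bool.or_false, Bool.not_false, if_true]
        simp [ih]

-- B's three index searches compute exactly takeWhile goodLine (dropWhile blank rest)
theorem alt_para2 (rest : List String) (start : Nat)
    (hs : findFirst (fun l => !(l == "")) rest = some start) :
    PySem.List.slice
      (PySem.List.slice rest (some (start : Int))
        (some (((match findFirst (fun l => l == "") (rest.drop start) with
                 | some k => start + k
                 | none => rest.length) : Nat) : Int)))
      none
      (some (((match findFirst isSectionHeading
                 (PySem.List.slice rest (some (start : Int))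
                   (some (((match findFirst (fun l => l == "") (rest.drop start) with
                            | some k => start + k
                            | none => rest.length) : Nat) : Int))) with
               | some j => j
               | none => (PySem.List.slice rest (some (start : Int))
                   (some (((match findFirst (fun l => l == "") (rest.drop start) with
                            | some k => start + k
                            | none => rest.length) : Nat) : Int))).length) : Nat) : Int)) =
    (rest.dropWhile (· == "")).takeWhile goodLine := by
  have hdrop : rest.drop start = rest.dropWhile (· == "") := by
    have := findFirst_some_drop (fun l => !(l == "")) rest start hs
    simpa using this
  -- para = takeWhile non-blank of (dropWhile blank rest)
  have hpara : PySem.List.slice rest (some (start : Int))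
      (some (((match findFirst (fun l => l == "") (rest.drop start) with
               | some k => start + k
               | none => rest.length) : Nat) : Int)) =
      (rest.dropWhile (· == "")).takeWhile (fun x => !(x == "")) := by
    cases hk : findFirst (fun l => l == "") (rest.drop start) with
    | some k =>
      have htake := findFirst_some_take (fun l => l == "") (rest.drop start) k hk
      have hred : (match (some k : Option Nat) with
          | some k => start + k | none => rest.length) = start + k := rfl
      rw [hred, PySem.List.slice_natCast]
      have h2 : start + k - start = k := by omega
      rw [h2, htake, hdrop]
    | none =>
      have htw := findFirst_none_takeWhile (fun l => l == "") (rest.drop start) hk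
      have hred : (match (none : Option Nat) with
          | some k => start + k | none => rest.length) = rest.length := rfl
      rw [hred, PySem.List.slice_natCast]
      have hlen : (rest.drop start).length = rest.length - start := by simp
      have h3 : rest.drop start = (rest.drop start).take (rest.length - start) := by
        rw [List.take_of_length_le (by omega)]
      rw [← h3, ← htw, hdrop]
  rw [hpara]
  set para := (rest.dropWhile (· == "")).takeWhile (fun x => !(x == "")) with hparaDef
  -- para2 = takeWhile non-heading of para
  have hpara2 : PySem.List.slice para none
      (some (((match findFirst isSectionHeading para with
               | some j => j
               | none => para.length) : Nat) : Int)) =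
      para.takeWhile (fun x => !isSectionHeading x) := by
    cases hc : findFirst isSectionHeading para with
    | some j =>
      have hred : (match (some j : Option Nat) with
          | some j => j | none => para.length) = j := rfl
      rw [hred, PySem.List.slice_to_natCast,
        findFirst_some_take isSectionHeading para j hc]
    | none =>
      have hred : (match (none : Option Nat) with
          | some j => j | none => para.length) = para.length := rfl
      rw [hred, PySem.List.slice_to_natCast, List.take_length,
        findFirst_none_takeWhile isSectionHeading para hc]
  rw [hpara2, hparaDef]
  exact takeWhile_good _

-- ===== A-side characterization (as in the accumulator analysis) =====

-- A skips leading blanks the same way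
theorem loopA_dropWhile (rest : List String) : loopA rest [] = loopA (rest.dropWhile (· == "")) [] := by
  induction rest with
  | nil => rfl
  | cons l t ih =>
    by_cases h : (l == "") = true
    · have hd : List.dropWhile (fun x => x == "") (l :: t) = List.dropWhile (fun x => x == "") t := by
        simp [h]
      rw [hd, ← ih]
      simp [loopA, h]
    · have hd : List.dropWhile (fun x => x == "") (l :: t) = l :: t := by
        simp [h]
      rw [hd]

-- the join of a nonempty prefix is a string prefix of the join of the whole list
theorem join_prefix (sep : List Char) (A B : List (List Char)) (hA : A ≠ []) :
    ∃ t, PySem.Chars.join sep (A ++ B) = PySem.Chars.join sep A ++ t := by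
  induction A with
  | nil => exact absurd rfl hA
  | cons a A' ih =>
    cases A' with
    | nil =>
      cases B with
      | nil => exact ⟨[], by simp⟩
      | cons b bs =>
        refine ⟨sep ++ PySem.Chars.join sep (b :: bs), ?_⟩
        simp [PySem.Chars.join, List.intercalate]
    | cons a' A'' =>
      obtain ⟨t, ht⟩ := ih (by simp)
      refine ⟨t, ?_⟩
      have h1 : PySem.Chars.join sep ((a :: a' :: A'') ++ B)
          = a ++ sep ++ PySem.Chars.join sep ((a' :: A'') ++ B) := by
        simp [PySem.Chars.join, List.intercalate]
      have h2 : PySem.Chars.join sep (a :: a' :: A'')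
          = a ++ sep ++ PySem.Chars.join sep (a' :: A'') := by
        simp [PySem.Chars.join, List.intercalate, List.intersperse]
      rw [h1, h2, ht]
      simp [List.append_assoc]

-- truncation at 1500 ignores everything after a prefix that is already ≥ 1500 chars long
theorem take_join_stable (A B : List String) (hA : A ≠ [])
    (hlen : 1500 ≤ (PySem.Str.join " " A).toList.length) :
    ((PySem.Str.join " " (A ++ B)).toList.take 1500) = ((PySem.Str.join " " A).toList.take 1500) := by
  obtain ⟨t, ht⟩ := join_prefix " ".toList (A.map String.toList) (B.map String.toList) (by simpa using hA)
  rw [PySem.Str.toList_join, List.map_append, ht, List.take_append_of_le_length]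
  · rw [← PySem.Str.toList_join]
  · rw [← PySem.Str.toList_join]; exact hlen

-- helper: one unfolding step of A's loop on a non-blank, non-heading line
theorem loopA_cons_good (line : String) (t acc : List String)
    (hb : ¬(line == "") = true) (hh : ¬isSectionHeading line = true) :
    loopA (line :: t) acc =
      if 1500 ≤ PySem.Str.len (PySem.Str.join " " (acc ++ [line])) then acc ++ [line]
      else loopA t (acc ++ [line]) := by
  conv_lhs => rw [loopA]
  rw [if_neg hb, if_neg hh]

-- main invariant: once the accumulator is nonempty and still under the cap, A's loop result,
-- truncated to 1500 chars, is the truncated join of acc ++ takeWhile goodLine rest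
theorem loopA_main (rest : List String) : ∀ acc, acc ≠ [] →
    (PySem.Str.join " " acc).toList.length < 1500 →
    loopA rest acc ≠ [] ∧
    ((PySem.Str.join " " (loopA rest acc)).toList.take 1500)
      = ((PySem.Str.join " " (acc ++ rest.takeWhile goodLine)).toList.take 1500) := by
  induction rest with
  | nil => intro acc hne _; simp [loopA, hne]
  | cons line t ih =>
    intro acc hne hlen
    by_cases hb : (line == "") = true
    · have h1 : loopA (line :: t) acc = acc := by
        simp [loopA, hb, List.isEmpty_iff, hne]
      have h2 : (line :: t).takeWhile goodLine = [] :=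
        List.takeWhile_cons_of_neg (by simp [goodLine, hb])
      rw [h1, h2]
      exact ⟨hne, by simp⟩
    · by_cases hh : isSectionHeading line = true
      · have h1 : loopA (line :: t) acc = acc := by simp [loopA, hb, hh]
        have h2 : (line :: t).takeWhile goodLine = [] :=
          List.takeWhile_cons_of_neg (by simp [goodLine, hh])
        rw [h1, h2]
        exact ⟨hne, by simp⟩
      · have hgood : goodLine line = true := by simp [goodLine, hb, hh]
        rw [List.takeWhile_cons_of_pos hgood, loopA_cons_good line t acc hb hh]
        have hsplit : acc ++ line :: List.takeWhile goodLine t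
            = (acc ++ [line]) ++ List.takeWhile goodLine t := by simp
        rw [hsplit]
        by_cases hc : 1500 ≤ PySem.Str.len (PySem.Str.join " " (acc ++ [line]))
        · rw [if_pos hc]
          refine ⟨by simp, ?_⟩
          have hlen' : 1500 ≤ (PySem.Str.join " " (acc ++ [line])).toList.length := by
            rw [PySem.Str.len_eq] at hc; exact_mod_cast hc
          exact (take_join_stable (acc ++ [line]) (t.takeWhile goodLine) (by simp) hlen').symm
        · rw [if_neg hc]
          have hlt : (PySem.Str.join " " (acc ++ [line])).toList.length < 1500 := by
            rw [PySem.Str.len_eq] at hc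
            have : ¬ (1500 : Int) ≤ ((PySem.Str.join " " (acc ++ [line])).toList.length : Int) := hc
            omega
          exact ih (acc ++ [line]) (by simp) hlt

-- characterization of A's loop from the empty accumulator
theorem loopA_spec (rest : List String) :
    (loopA rest [] = [] ↔ ((rest.dropWhile (· == "")).takeWhile goodLine) = []) ∧
    (((rest.dropWhile (· == "")).takeWhile goodLine) ≠ [] →
      ((PySem.Str.join " " (loopA rest [])).toList.take 1500)
        = ((PySem.Str.join " " ((rest.dropWhile (· == "")).takeWhile goodLine)).toList.take 1500)) := by
  rw [loopA_dropWhile]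
  set r := rest.dropWhile (· == "") with hr
  cases hcase : r with
  | nil => simp [loopA]
  | cons l t =>
    have hlne : ¬ (l == "") = true := by
      have := List.head?_dropWhile_not (fun s => s == "") rest
      rw [← hr, hcase] at this
      simpa using this
    by_cases hh : isSectionHeading l = true
    · have h1 : loopA (l :: t) [] = [] := by simp [loopA, hlne, hh]
      have h2 : (l :: t).takeWhile goodLine = [] :=
        List.takeWhile_cons_of_neg (by simp [goodLine, hh])
      simp [h1, h2]
    · have hgood : goodLine l = true := by
        simp only [goodLine, hh, Bool.or_false]
        simp at hlne
        simp [hlne]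
      have htw : (l :: t).takeWhile goodLine = l :: t.takeWhile goodLine :=
        List.takeWhile_cons_of_pos hgood
      have h1 := loopA_cons_good l t [] hlne hh
      simp only [List.nil_append] at h1
      rw [h1, htw]
      by_cases hc : 1500 ≤ PySem.Str.len (PySem.Str.join " " [l])
      · rw [if_pos hc]
        have hlen' : 1500 ≤ (PySem.Str.join " " [l]).toList.length := by
          rw [PySem.Str.len_eq] at hc; exact_mod_cast hc
        refine ⟨by simp, fun _ => ?_⟩
        exact (take_join_stable [l] (t.takeWhile goodLine) (by simp) hlen').symm
      · rw [if_neg hc]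
        have hlt : (PySem.Str.join " " [l]).toList.length < 1500 := by
          rw [PySem.Str.len_eq] at hc
          have : ¬ (1500 : Int) ≤ ((PySem.Str.join " " [l]).toList.length : Int) := hc
          omega
        obtain ⟨h2, h3⟩ := loopA_main t [l] (by simp) hlt
        exact ⟨by simp [h2], fun _ => h3⟩

-- ===== VERDICT (by name: the statement is the Claim_ definition above) =====
theorem extract_abstract_from_lines_py_spec : Claim_equal_extract_abstract_from_lines_py := by
  intro lines abstract_idx _
  unfold Spec_extract_abstract_from_lines_py
  cases abstract_idx with
  | none => rfl
  | some idx =>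
    unfold extract_abstract_from_lines_py extract_abstract_from_lines_py_alt
    simp only
    set rest := PySem.List.slice lines (some (idx + 1)) none with hrest
    obtain ⟨hiff, heq⟩ := loopA_spec rest
    cases hs : findFirst (fun l => !(l == "")) rest with
    | none =>
      -- every line after the heading is blank: both sides return none
      have hdw : rest.dropWhile (· == "") = [] := by
        have := findFirst_none_dropWhile (fun l => !(l == "")) rest hs
        simpa using this
      have : loopA rest [] = [] := hiff.mpr (by rw [hdw]; rfl)
      simp [this]
    | some start =>
      have hp2 := alt_para2 rest start hs
      dsimp only
      rw [hp2]
      by_cases hz : (rest.dropWhile (· == "")).takeWhile goodLine = []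
      · have : loopA rest [] = [] := hiff.mpr hz
        rw [this, hz]
      · have hA : loopA rest [] ≠ [] := fun h => hz (hiff.mp h)
        have hts := heq hz
        simp only [List.isEmpty_eq_false_iff.mpr hA, List.isEmpty_eq_false_iff.mpr hz]
        simp only [Bool.false_eq_true, if_false]
        refine congrArg some ?_
        rw [← String.toList_inj]
        simp only [PySem.Str.slice]
        rw [String.toList_ofList, String.toList_ofList]
        rw [PySem.Chars.slice_eq_listSlice, PySem.Chars.slice_eq_listSlice]
        have hsl : ∀ (cs : List Char), PySem.List.slice cs none (some (1500 : Int)) = cs.take 1500 := by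
          intro cs
          rw [PySem.List.slice_to cs (show (0 : Int) ≤ 1500 by norm_num)]
          rfl
        rw [hsl, hsl]
        exact hts
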